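-- pv_equiv track=rewrite | github.com/danielhamelberg/colly | colly.py | find_min_truncation_length
-- ===== SOURCE A (Python) =====
-- from typing import List, Optional, Set, Tuple
--
-- def truncate_string(s: str, max_length: int) -> str:
--     """Truncate a string to a maximum length without adding any suffix."""
--     return s[:max_length] if len(s) > max_length else s
--
-- def find_min_truncation_length(words: Set[str], max_length: int) -> Optional[int]:
--     """Find the minimal truncation length X to avoid new duplicates."""
--     if not words:
--         return None
--     min_possible_length = 1
--     max_possible_length = min(max(len(word) for word in words), max_length)
--     for X in range(min_possible_length, max_possible_length + 1):
--         truncated_words = {truncate_string(word, X) for word in words}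
--         if len(truncated_words) == len(words):
--             return X
--     return None
-- ===== SOURCE B (Python) =====
-- def find_min_truncation_length(words, max_length):
--     """Least X in [1, min(max word length, max_length)] whose truncations stay
--     distinct, found by binary search (the no-collision predicate is monotone in X)."""
--     if not words:
--         return None
--     hi = min(max(len(w) for w in words), max_length)
--     if hi < 1:
--         return None
--
--     def distinct(x):
--         seen = set()
--         for w in words:
--             t = w[:x]
--             if t in seen:
--                 return False
--             seen.add(t)
--         return True
--
--     if not distinct(hi):
--         return None
--     lo = 1
--     while lo < hi:
--         mid = (lo + hi) // 2
--         if distinct(mid):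
--             hi = mid
--         else:
--             lo = mid + 1
--     return lo
-- ===== Notes on version B (the rewrite author's own statement) =====
-- stated objective: alternative
-- what changed: Replaces A's linear scan over every candidate length X (rebuilding the full truncation set at each X) with a binary search over X exploiting the monotonicity of the 'all truncations distinct' predicate, each probe using an early-exit duplicate check; intended as faster (O(n*L*log L) vs O(n*L^2) probes) but a timing run could not confirm it consistently, so no speed is claimed.
import Mathlib
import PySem

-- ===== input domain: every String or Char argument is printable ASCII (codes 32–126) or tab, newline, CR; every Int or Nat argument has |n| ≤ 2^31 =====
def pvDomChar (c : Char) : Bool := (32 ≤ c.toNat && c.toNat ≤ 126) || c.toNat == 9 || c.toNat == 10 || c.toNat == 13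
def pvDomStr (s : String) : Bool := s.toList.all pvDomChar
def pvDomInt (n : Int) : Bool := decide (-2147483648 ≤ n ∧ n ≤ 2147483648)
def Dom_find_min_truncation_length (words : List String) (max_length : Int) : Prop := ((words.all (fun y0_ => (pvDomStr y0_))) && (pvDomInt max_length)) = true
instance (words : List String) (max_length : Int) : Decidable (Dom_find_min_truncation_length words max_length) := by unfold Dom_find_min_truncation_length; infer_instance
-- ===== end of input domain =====

-- B replaces A's linear scan over truncation lengths by a binary search over the
-- monotone no-collision predicate (equal return values proved below).

-- ===== PORT A =====
def truncate_string (s : String) (max_length : Int) : String :=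
  if PySem.Str.len s > max_length then PySem.Str.slice s none (some max_length) else s

-- the 'for X in range(...)' loop with its early return
def fmtlA_scan (words : List String) : List Int → Option Int
  | [] => none
  | X :: rest =>
    if PySem.Set.len (PySem.Set.ofList (words.map (fun w => truncate_string w X))) = (words.length : Int)
    then some X
    else fmtlA_scan words rest

def find_min_truncation_length (words : List String) (max_length : Int) : Option Int :=
  if words = [] then none
  else
    match PySem.List.max? (words.map PySem.Str.len) (fun x => x) with
    | none => none   -- unreachable: words ≠ []
    | some m =>
      let max_possible_length := min m max_length
      fmtlA_scan words (PySem.List.pyRange 1 (max_possible_length + 1))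

-- ===== PORT B =====
-- the 'for w in words' loop of distinct(x), with its early 'return False'
def fmtlB_go (x : Int) (seen : PySem.Set String) : List String → Bool
  | [] => true
  | w :: rest =>
    let t := PySem.Str.slice w none (some x)
    if seen.contains t then false else fmtlB_go x (seen.add t) rest

def fmtlB_distinct (words : List String) (x : Int) : Bool :=
  fmtlB_go x PySem.Set.empty words

-- the 'while lo < hi' binary-search loop
def fmtlB_bs (words : List String) (lo hi : Int) : Int :=
  if _h : lo < hi then
    let mid := PySem.Int.floordiv (lo + hi) 2
    if fmtlB_distinct words mid then fmtlB_bs words lo mid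
    else fmtlB_bs words (mid + 1) hi
  else lo
termination_by (hi - lo).toNat
decreasing_by
  · have _h1 : lo ≤ PySem.Int.floordiv (lo + hi) 2 :=
      (PySem.Int.le_floordiv_iff_mul_le (by norm_num)).mpr (by omega)
    have _h2 : PySem.Int.floordiv (lo + hi) 2 < hi :=
      (PySem.Int.floordiv_lt_iff_lt_mul (by norm_num)).mpr (by omega)
    omega
  · have _h1 : lo ≤ PySem.Int.floordiv (lo + hi) 2 :=
      (PySem.Int.le_floordiv_iff_mul_le (by norm_num)).mpr (by omega)
    have _h2 : PySem.Int.floordiv (lo + hi) 2 < hi :=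
      (PySem.Int.floordiv_lt_iff_lt_mul (by norm_num)).mpr (by omega)
    omega

def find_min_truncation_length_alt (words : List String) (max_length : Int) : Option Int :=
  if words = [] then none
  else
    match PySem.List.max? (words.map PySem.Str.len) (fun x => x) with
    | none => none   -- unreachable: words ≠ []
    | some m =>
      let hi := min m max_length
      if hi < 1 then none
      else if fmtlB_distinct words hi then some (fmtlB_bs words 1 hi)
      else none

-- ===== PRECONDITION & SPEC =====
def Spec_find_min_truncation_length (words : List String) (max_length : Int) (out : Option Int) : Prop := out = find_min_truncation_length_alt words max_length
instance (words : List String) (max_length : Int) (out : Option Int) : Decidable (Spec_find_min_truncation_length words max_length out) := by unfold Spec_find_min_truncation_length; infer_instance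

-- ===== CLAIM (what is proved, stated in full; the proofs are below) =====
def Claim_equal_find_min_truncation_length : Prop := ∀ (words : List String) (max_length : Int), Dom_find_min_truncation_length words max_length → Spec_find_min_truncation_length words max_length (find_min_truncation_length words max_length)

-- ===== LEMMAS AND PROOFS =====

-- truncation to X, the common core of both programs
def fmtlTrunc (X : Int) (w : String) : String := PySem.Str.slice w none (some X)

-- 'all truncations to X are pairwise distinct'
def fmtlP (words : List String) (X : Int) : Prop := (words.map (fmtlTrunc X)).Nodup

lemma fmtlTrunc_toList (X : Int) (w : String) (h0 : 0 ≤ X) :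
    (fmtlTrunc X w).toList = w.toList.take X.toNat := by
  simp [fmtlTrunc, PySem.Str.toList_slice, PySem.List.slice_to _ h0]

lemma truncate_string_eq (X : Int) (w : String) : truncate_string w X = fmtlTrunc X w := by
  unfold truncate_string fmtlTrunc
  split_ifs with h
  · rfl
  · have hl : (w.toList.length : Int) ≤ X := by
      have := PySem.Str.len_eq w
      omega
    have h0 : 0 ≤ X := le_trans (by positivity) hl
    show w = fmtlTrunc X w
    rw [← String.toList_inj, fmtlTrunc_toList X w h0]
    exact (List.take_of_length_le (by omega)).symm

lemma fmtlTrunc_trunc (X Y : Int) (w : String) (h0 : 0 ≤ X) (hXY : X ≤ Y) :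
    fmtlTrunc X (fmtlTrunc Y w) = fmtlTrunc X w := by
  rw [← String.toList_inj, fmtlTrunc_toList X _ h0, fmtlTrunc_toList X w h0,
    fmtlTrunc_toList Y w (le_trans h0 hXY), List.take_take]
  congr 1
  omega

lemma fmtlP_mono (words : List String) {X Y : Int} (h0 : 0 ≤ X) (hXY : X ≤ Y)
    (hP : fmtlP words X) : fmtlP words Y := by
  have hmap : words.map (fmtlTrunc X) = (words.map (fmtlTrunc Y)).map (fmtlTrunc X) := by
    rw [List.map_map]
    exact List.map_congr_left (fun w _ => (fmtlTrunc_trunc X Y w h0 hXY).symm)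
  rw [fmtlP, hmap] at hP
  exact hP.of_map _

-- the size of set(l) equals len(l) exactly when l has no duplicates
lemma fmtl_ofList_length_iff {α : Type} [BEq α] [LawfulBEq α] [DecidableEq α] (l : List α) :
    (PySem.Set.ofList l).length = l.length ↔ l.Nodup := by
  constructor
  · intro h
    have hfin : (PySem.Set.ofList l).toFinset = l.toFinset := by
      ext x
      simp [List.mem_toFinset, PySem.Set.mem_ofList]
    have c1 : (PySem.Set.ofList l).toFinset.card = (PySem.Set.ofList l).length :=
      List.toFinset_card_of_nodup (PySem.Set.nodup_ofList l)
    have c2 : l.toFinset.card = l.dedup.length := List.card_toFinset l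
    have hlen : l.dedup.length = l.length := by rw [← c2, ← hfin, c1, h]
    exact List.dedup_eq_self.mp ((List.dedup_sublist l).eq_of_length hlen)
  · intro h
    rw [PySem.Set.ofList_eq_self_of_nodup l h]

-- A's loop condition equals the distinctness predicate
lemma fmtl_condA_iff (words : List String) (X : Int) :
    PySem.Set.len (PySem.Set.ofList (words.map (fun w => truncate_string w X))) = (words.length : Int)
      ↔ fmtlP words X := by
  have hmap : words.map (fun w => truncate_string w X) = words.map (fmtlTrunc X) :=
    List.map_congr_left (fun w _ => truncate_string_eq X w)
  rw [PySem.Set.len, hmap, fmtlP, Int.natCast_inj]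
  rw [show words.length = (words.map (fmtlTrunc X)).length from (List.length_map ..).symm]
  exact fmtl_ofList_length_iff _

-- B's early-exit scan computes the distinctness predicate
lemma fmtlB_go_iff (x : Int) (ws : List String) (seen : PySem.Set String) :
    fmtlB_go x seen ws = true ↔
      ((ws.map (fmtlTrunc x)).Nodup ∧ ∀ w ∈ ws, fmtlTrunc x w ∉ seen) := by
  induction ws generalizing seen with
  | nil => simp [fmtlB_go]
  | cons w ws ih =>
    show (if seen.contains (fmtlTrunc x w) then false else fmtlB_go x (seen.add (fmtlTrunc x w)) ws) = true ↔ _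
    by_cases hc : fmtlTrunc x w ∈ seen
    · rw [if_pos ((PySem.Set.contains_iff seen _).mpr hc)]
      simp only [Bool.false_eq_true, false_iff, not_and]
      intro _ hall
      exact hall w (List.mem_cons_self ..) hc
    · rw [if_neg (fun h => hc ((PySem.Set.contains_iff seen _).mp h)), ih]
      simp only [List.map_cons, List.nodup_cons, PySem.Set.mem_add, List.mem_cons, List.mem_map]
      aesop

lemma fmtlB_distinct_iff (words : List String) (x : Int) :
    fmtlB_distinct words x = true ↔ fmtlP words x := by
  rw [fmtlB_distinct, fmtlB_go_iff, fmtlP]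
  simp [PySem.Set.empty]

-- A's scan returns none when no candidate works
lemma fmtlA_scan_none (words : List String) (L : List Int)
    (h : ∀ X ∈ L, ¬ fmtlP words X) : fmtlA_scan words L = none := by
  induction L with
  | nil => rfl
  | cons X rest ih =>
    rw [fmtlA_scan, if_neg (fun hc => h X (List.mem_cons_self ..) ((fmtl_condA_iff words X).mp hc))]
    exact ih (fun Y hY => h Y (List.mem_cons_of_mem _ hY))

-- A's scan returns the least satisfying candidate
lemma fmtlA_scan_some (words : List String) (k : Int) (hPk : fmtlP words k)
    (hmin : ∀ X, 1 ≤ X → X < k → ¬ fmtlP words X) :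
    ∀ (n : Nat) (a b : Int), (k - a).toNat ≤ n → 1 ≤ a → a ≤ k → k < b →
      fmtlA_scan words (PySem.List.pyRange a b) = some k := by
  intro n
  induction n with
  | zero =>
    intro a b hle h1 h2 h3
    have hak : a = k := by omega
    rw [PySem.List.pyRange_one_cons (by omega), fmtlA_scan,
      if_pos ((fmtl_condA_iff words a).mpr (hak ▸ hPk)), hak]
  | succ n ih =>
    intro a b hle h1 h2 h3
    by_cases hak : a = k
    · rw [PySem.List.pyRange_one_cons (by omega), fmtlA_scan,
        if_pos ((fmtl_condA_iff words a).mpr (hak ▸ hPk)), hak]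
    · rw [PySem.List.pyRange_one_cons (by omega), fmtlA_scan,
        if_neg (fun hc => hmin a h1 (by omega) ((fmtl_condA_iff words a).mp hc))]
      exact ih (a + 1) b (by omega) (by omega) (by omega) h3

-- B's binary search returns the least satisfying candidate
lemma fmtlB_bs_eq (words : List String) (k : Int) (hPk : fmtlP words k)
    (hmin : ∀ X, 1 ≤ X → X < k → ¬ fmtlP words X) :
    ∀ (n : Nat) (lo hi : Int), (hi - lo).toNat ≤ n → 1 ≤ lo → lo ≤ k → k ≤ hi →
      fmtlB_bs words lo hi = k := by
  intro n
  induction n with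
  | zero =>
    intro lo hi hle h1 h2 h3
    rw [fmtlB_bs, dif_neg (by omega : ¬ lo < hi)]
    omega
  | succ n ih =>
    intro lo hi hle h1 h2 h3
    by_cases hlh : lo < hi
    · rw [fmtlB_bs, dif_pos hlh]
      have hmlo : lo ≤ PySem.Int.floordiv (lo + hi) 2 :=
        (PySem.Int.le_floordiv_iff_mul_le (by norm_num)).mpr (by omega)
      have hmhi : PySem.Int.floordiv (lo + hi) 2 < hi :=
        (PySem.Int.floordiv_lt_iff_lt_mul (by norm_num)).mpr (by omega)
      set mid := PySem.Int.floordiv (lo + hi) 2 with hmid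
      by_cases hd : fmtlB_distinct words mid
      · rw [if_pos hd]
        have hkm : k ≤ mid := by
          by_contra hkm
          exact hmin mid (by omega) (by omega) ((fmtlB_distinct_iff words mid).mp hd)
        exact ih lo mid (by omega) h1 h2 hkm
      · rw [if_neg hd]
        have hmk : mid < k := by
          by_contra hmk
          exact hd ((fmtlB_distinct_iff words mid).mpr
            (fmtlP_mono words (by omega) (by omega : k ≤ mid) hPk))
        exact ih (mid + 1) hi (by omega) (by omega) (by omega) h3
    · rw [fmtlB_bs, dif_neg hlh]
      omega

-- ===== VERDICT (by name: the statement is the Claim_ definition above) =====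
theorem find_min_truncation_length_spec : Claim_equal_find_min_truncation_length := by
  intro words max_length _dom
  unfold Spec_find_min_truncation_length
  unfold find_min_truncation_length find_min_truncation_length_alt
  by_cases hnil : words = []
  · simp [hnil]
  · simp only [if_neg hnil]
    cases hmax : PySem.List.max? (words.map PySem.Str.len) (fun x => x) with
    | none => rfl
    | some m =>
      dsimp only
      set hi := min m max_length with hhi
      by_cases hlt : hi < 1
      · rw [PySem.List.pyRange_one_eq_nil (by omega)]
        simp [fmtlA_scan, hlt]
      · rw [not_lt] at hlt
        rw [if_neg (by omega)]
        by_cases hok : fmtlB_distinct words hi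
        · have hPhi : fmtlP words hi := (fmtlB_distinct_iff words hi).mp hok
          have hex : ∃ n : Nat, fmtlP words ((n : Int) + 1) := by
            refine ⟨(hi - 1).toNat, ?_⟩
            have : ((hi - 1).toNat : Int) + 1 = hi := by omega
            rw [this]; exact hPhi
          classical
          set N := Nat.find hex with hN
          set k : Int := (N : Int) + 1 with hk
          have hPk : fmtlP words k := Nat.find_spec hex
          have hkle : k ≤ hi := by
            have := Nat.find_min' hex (m := (hi - 1).toNat) (by
              have : ((hi - 1).toNat : Int) + 1 = hi := by omega
              rw [this]; exact hPhi)
            omega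
          have hmin : ∀ X, 1 ≤ X → X < k → ¬ fmtlP words X := by
            intro X h1 hXk hPX
            have hn : (X - 1).toNat < N := by omega
            have := Nat.find_min hex hn
            have hfix : (((X - 1).toNat : Int)) + 1 = X := by omega
            rw [hfix] at this
            exact this hPX
          rw [if_pos hok]
          rw [fmtlA_scan_some words k hPk hmin (k - 1).toNat 1 (hi + 1) (by omega) (by omega) (by omega) (by omega)]
          rw [fmtlB_bs_eq words k hPk hmin (hi - 1).toNat 1 hi (by omega) (by omega) (by omega) hkle]
        · rw [if_neg hok]
          apply fmtlA_scan_none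
          intro X hX hPX
          rw [PySem.List.mem_pyRange_one] at hX
          exact hok ((fmtlB_distinct_iff words hi).mpr
            (fmtlP_mono words (by omega) (by omega : X ≤ hi) hPX))
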